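-- pv_equiv track=rewrite | github.com/JCChoqueM/php-py-js | Tema 6 - Funciones/ejercicio17/archives/automaticamente/automaticamente.py | transformar
-- ===== SOURCE A (Python) =====
-- def transformar(divisor):
--     suma = 0
--     i = 0
--     while divisor > 0:
--         suma += (divisor % 10) * 2**i
--         divisor = divisor // 10
--         i += 1
--     return suma
-- ===== SOURCE B (Python) =====
-- def transformar(divisor):
--     if divisor <= 0:
--         return 0
--     acc = 0
--     for ch in str(divisor):
--         acc = acc * 2 + (ord(ch) - 48)
--     return acc
-- ===== Notes on version B (the rewrite author's own statement) =====
-- stated objective: alternative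
-- what changed: B replaces A's least-significant-first while-loop that recomputes successive powers of two with a most-significant-first Horner pass over the decimal string representation.
import Mathlib
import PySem

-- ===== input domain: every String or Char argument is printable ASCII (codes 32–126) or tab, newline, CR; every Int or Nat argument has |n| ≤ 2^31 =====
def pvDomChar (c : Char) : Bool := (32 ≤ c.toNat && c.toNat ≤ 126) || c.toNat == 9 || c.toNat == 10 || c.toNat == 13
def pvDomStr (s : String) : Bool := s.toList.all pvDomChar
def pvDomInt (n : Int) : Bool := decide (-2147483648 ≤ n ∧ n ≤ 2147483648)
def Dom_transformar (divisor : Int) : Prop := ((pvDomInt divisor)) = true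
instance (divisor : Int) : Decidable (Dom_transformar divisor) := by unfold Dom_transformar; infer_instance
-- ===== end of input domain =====

-- B reads the decimal digits most-significant-first via str() and Horner's rule instead of
-- A's least-significant-first while-loop with 2**i; same value, different traversal (objective: alternative).

-- ===== PORT A =====
-- the while-loop of A: state (divisor, suma, i), guard divisor > 0
def transformarLoop (divisor suma : Int) (i : Nat) : Int :=
  if h : divisor > 0 then
    transformarLoop (PySem.Int.floordiv divisor 10)
      (suma + (PySem.Int.mod divisor 10) * 2 ^ i) (i + 1)
  else suma
termination_by divisor.toNat
decreasing_by
  rw [PySem.Int.floordiv_eq_ediv_of_pos (by omega)]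
  omega

def transformar (divisor : Int) : Int := transformarLoop divisor 0 0

-- ===== PORT B =====
def transformar_alt (divisor : Int) : Int :=
  if divisor ≤ 0 then 0
  else
    -- for ch in str(divisor): acc = acc * 2 + (ord(ch) - 48)
    (PySem.Int.toStr divisor).toList.foldl
      (fun acc c => acc * 2 + ((c.toNat : Int) - 48)) 0

-- ===== PRECONDITION & SPEC =====
def Spec_transformar (divisor : Int) (out : Int) : Prop := out = transformar_alt divisor
instance (divisor : Int) (out : Int) : Decidable (Spec_transformar divisor out) := by unfold Spec_transformar; infer_instance

-- ===== CLAIM (what is proved, stated in full; the proofs are below) =====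
def Claim_equal_transformar : Prop := ∀ (divisor : Int), Dom_transformar divisor → Spec_transformar divisor (transformar divisor)

-- ===== LEMMAS AND PROOFS =====

-- the value both programs compute: Σ digit_i(n) * 2^i over decimal digits of n, LSB recursion
def binVal (n : Nat) : Int :=
  if n = 0 then 0 else (n % 10 : Nat) + 2 * binVal (n / 10)
decreasing_by omega

-- number of decimal digits
def digCount (n : Nat) : Nat :=
  if n < 10 then 1 else digCount (n / 10) + 1
decreasing_by omega

-- B's fold step
def hstep (acc : Int) (c : Char) : Int := acc * 2 + ((c.toNat : Int) - 48)

lemma hstep_digitChar (r : Nat) (hr : r < 10) (acc : Int) :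
    hstep acc (Nat.digitChar r) = acc * 2 + r := by
  interval_cases r <;> simp [hstep, Nat.digitChar]

-- A's loop computes suma + 2^i * binVal divisor
lemma transformarLoop_eq (divisor suma : Int) (i : Nat) :
    transformarLoop divisor suma i = suma + 2 ^ i * binVal divisor.toNat := by
  by_cases h : divisor > 0
  · rw [transformarLoop.eq_def, dif_pos h,
      transformarLoop_eq (PySem.Int.floordiv divisor 10) _ (i + 1)]
    rw [PySem.Int.floordiv_eq_ediv_of_pos (by omega),
      PySem.Int.mod_eq_emod_of_pos (by omega)]
    have hd : (divisor / 10).toNat = divisor.toNat / 10 := by omega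
    have hm : divisor % 10 = ((divisor.toNat % 10 : Nat) : Int) := by omega
    rw [hd, hm]
    have hne : divisor.toNat ≠ 0 := by omega
    have hb : binVal divisor.toNat
        = ((divisor.toNat % 10 : Nat) : Int) + 2 * binVal (divisor.toNat / 10) := by
      rw [binVal.eq_def, if_neg hne]
    rw [hb]
    ring
  · rw [transformarLoop.eq_def, dif_neg h]
    have h0 : divisor.toNat = 0 := by omega
    rw [h0, binVal.eq_def]
    simp
termination_by divisor.toNat
decreasing_by rw [PySem.Int.floordiv_eq_ediv_of_pos (by omega)]; omega

-- Horner's fold over toDigitsCore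
lemma foldl_toDigitsCore (f : Nat) : ∀ (n : Nat) (acc : Int) (ds : List Char),
    0 < f → n < 10 ^ f →
    (Nat.toDigitsCore 10 f n ds).foldl hstep acc
      = ds.foldl hstep (acc * 2 ^ digCount n + binVal n) := by
  induction f with
  | zero => intro n acc ds h; omega
  | succ f ih =>
    intro n acc ds _ hn
    cases hq : n / 10 with
    | zero =>
      have hlt : n < 10 := by omega
      have h1 : digCount n = 1 := by rw [digCount.eq_def, if_pos hlt]
      have h2 : binVal n = ((n % 10 : Nat) : Int) := by
        rw [binVal.eq_def]
        by_cases hz : n = 0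
        · simp [hz]
        · rw [if_neg hz, hq, binVal.eq_def]; simp
      simp only [Nat.toDigitsCore, hq, reduceIte, List.foldl_cons]
      rw [hstep_digitChar (n % 10) (by omega), h1, h2]
      norm_num
    | succ k =>
      have hf : 0 < f := by
        rcases Nat.eq_zero_or_pos f with hf0 | hf0
        · subst hf0; simp at hn; omega
        · exact hf0
      have hdiv : n / 10 < 10 ^ f :=
        (Nat.div_lt_iff_lt_mul (by norm_num)).mpr (by rw [← pow_succ]; exact hn)
      have h1 : digCount n = digCount (n / 10) + 1 := by
        rw [digCount.eq_def, if_neg (by omega)]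
      have h2 : binVal n = ((n % 10 : Nat) : Int) + 2 * binVal (n / 10) := by
        rw [binVal.eq_def, if_neg (by omega)]
      simp only [Nat.toDigitsCore, hq]
      rw [if_neg (Nat.succ_ne_zero k), ← hq, ih (n / 10) acc (Nat.digitChar (n % 10) :: ds) hf hdiv,
        List.foldl_cons, hstep_digitChar (n % 10) (by omega)]
      have : (acc * 2 ^ digCount (n / 10) + binVal (n / 10)) * 2 + ((n % 10 : Nat) : Int)
          = acc * 2 ^ digCount n + binVal n := by
        rw [h1, h2, pow_succ]; ring
      rw [this]

lemma alt_eq_binVal (divisor : Int) (h : 0 < divisor) :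
    transformar_alt divisor = binVal divisor.toNat := by
  rw [transformar_alt, if_neg (by omega), PySem.Int.toList_toStr,
    PySem.Int.toChars, if_neg (by omega), Nat.toDigits]
  have hlam : (fun (acc : Int) (c : Char) => acc * 2 + ((c.toNat : Int) - 48)) = hstep := rfl
  rw [hlam, foldl_toDigitsCore (divisor.toNat + 1) divisor.toNat 0 [] (by omega)
      (lt_of_lt_of_le (Nat.lt_pow_self (by omega))
        (Nat.pow_le_pow_right (by omega) (by omega)))]
  simp

-- ===== VERDICT (by name: the statement is the Claim_ definition above) =====
theorem transformar_spec : Claim_equal_transformar := by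
  intro divisor _
  show transformar divisor = transformar_alt divisor
  by_cases h : 0 < divisor
  · rw [alt_eq_binVal divisor h, transformar, transformarLoop_eq]
    simp
  · rw [transformar, transformarLoop.eq_def, dif_neg h, transformar_alt, if_pos (by omega)]
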